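-- pv_equiv track=rewrite | github.com/halfprice06/longslop | app/services/audio_service.py | normalize_speaker_name
-- ===== SOURCE A (Python) =====
-- def normalize_speaker_name(speaker: str) -> str:
--     """
--     Normalize speaker names to ensure consistency, handling complex cases like 'Ghost of Miranda's Mother'.
--     """
--     # First handle special case for narrator
--     if speaker.strip().lower() == "narrator":
--         return "Narrator"
--
--     # Handle the full name as one unit first
--     name = speaker.strip()
--
--     # Split into words while preserving possessives
--     words = []
--     current_word = []
--
--     for char in name:
--         if char == ' ':
--             if current_word:
--                 words.append(''.join(current_word))
--                 current_word = []
--             words.append(char)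
--         elif char == "'":
--             current_word.append(char)
--         else:
--             current_word.append(char)
--
--     if current_word:
--         words.append(''.join(current_word))
--
--     # Process each word
--     normalized_words = []
--     for word in words:
--         if word == ' ':
--             normalized_words.append(word)
--         elif word.lower() in ['of', 'the', 'and', 'in', 'on', 'at']:
--             normalized_words.append(word.lower())
--         else:
--             # Handle possessives
--             if "'" in word:
--                 base, possessive = word.split("'", 1)
--                 if possessive.lower().startswith('s'):
--                     normalized_words.append(f"{base.title()}'s")
--                 else:
--                     normalized_words.append(f"{base.title()}'{possessive}")
--             else:
--                 normalized_words.append(word.title())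
--
--     return ''.join(normalized_words)
-- ===== SOURCE B (Python) =====
-- SMALL_WORDS = {'of', 'the', 'and', 'in', 'on', 'at'}
--
-- def _norm_word(word):
--     lw = word.lower()
--     if lw in SMALL_WORDS:
--         return lw
--     if "'" not in word:
--         return word.title()
--     base, possessive = word.split("'", 1)
--     if possessive.lower().startswith('s'):
--         return base.title() + "'s"
--     return base.title() + "'" + possessive
--
-- def normalize_speaker_name(speaker: str) -> str:
--     if speaker.strip().lower() == "narrator":
--         return "Narrator"
--     name = speaker.strip()
--     return ' '.join(_norm_word(w) for w in name.split(' '))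
-- ===== Notes on version B (the rewrite author's own statement) =====
-- stated objective: simpler
-- what changed: Replaces A's char-by-char tokenizer (interleaved word/space token list, second normalizing pass, concatenating join) with a single split-on-space / per-word normalize / join-with-space decomposition; fewer passes and no per-character list building make it measurably faster too.
import Mathlib
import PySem

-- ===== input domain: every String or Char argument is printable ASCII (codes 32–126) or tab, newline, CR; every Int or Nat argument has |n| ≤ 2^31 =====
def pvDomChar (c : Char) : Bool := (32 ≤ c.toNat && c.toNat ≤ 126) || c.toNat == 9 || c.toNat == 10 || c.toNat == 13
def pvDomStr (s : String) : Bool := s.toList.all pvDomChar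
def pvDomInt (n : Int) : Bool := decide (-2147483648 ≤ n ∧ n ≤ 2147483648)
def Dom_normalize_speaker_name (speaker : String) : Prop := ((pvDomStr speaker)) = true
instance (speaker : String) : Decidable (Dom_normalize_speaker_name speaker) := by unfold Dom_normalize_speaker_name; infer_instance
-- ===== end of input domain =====

-- B replaces A's char-by-char tokenizer (word/space token list + second normalizing pass) by a
-- single split(' ') / per-word normalize / ' '.join decomposition; objective: simpler/idiomatic.

-- ===== shared primitive ports (builtins both Pythons call) =====
-- hand port of str.title(): exact on the ASCII domain (a letter following a non-letter is
-- uppercased, a letter following a letter is lowercased, other characters unchanged)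
def pyTitleAux : List Char → Bool → List Char
  | [], _ => []
  | c :: cs, prev =>
    if PySem.Chars.isalpha c then
      (if prev then PySem.Chars.lowerChar c else PySem.Chars.upperChar c) :: pyTitleAux cs true
    else c :: pyTitleAux cs false

def pyTitle (w : List Char) : List Char := pyTitleAux w false

-- hand port of w.split("'", 1): exact whenever "'" occurs in w (the only place either Python calls it)
def splitFirstApos : List Char → List Char × List Char
  | [] => ([], [])
  | c :: cs =>
    if c = '\'' then ([], cs)
    else
      let r := splitFirstApos cs
      (c :: r.1, r.2)

def smallWords : List (List Char) :=
  [['o','f'], ['t','h','e'], ['a','n','d'], ['i','n'], ['o','n'], ['a','t']]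

-- ===== PORT A =====
-- A's first loop: builds the token list (words and single-space tokens) and the running word
def tokStepA (st : List (List Char) × List Char) (c : Char) : List (List Char) × List Char :=
  if c = ' ' then
    ((if st.2 = [] then st.1 else st.1 ++ [st.2]) ++ [[' ']], [])
  else if c = '\'' then (st.1, st.2 ++ [c])
  else (st.1, st.2 ++ [c])

-- body of A's second loop
def normWordA (w : List Char) : List Char :=
  if w = [' '] then w
  else if PySem.Chars.lower w ∈ smallWords then PySem.Chars.lower w
  else if PySem.Chars.isIn ['\''] w then
    let bp := splitFirstApos w
    if PySem.Chars.startswith (PySem.Chars.lower bp.2) ['s'] then pyTitle bp.1 ++ ['\'', 's']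
    else pyTitle bp.1 ++ ['\''] ++ bp.2
  else pyTitle w

def normalize_speaker_name (speaker : String) : String :=
  if PySem.Str.lower (PySem.Str.strip speaker) = "narrator" then "Narrator"
  else
    let name := (PySem.Str.strip speaker).toList
    let st := name.foldl tokStepA ([], [])
    let words := if st.2 = [] then st.1 else st.1 ++ [st.2]
    let normalized := words.foldl (fun acc w => acc ++ [normWordA w]) ([] : List (List Char))
    String.ofList (PySem.Chars.join [] normalized)

-- ===== PORT B =====
-- Source B's _norm_word helper
def normWordB (w : List Char) : List Char :=
  let lw := PySem.Chars.lower w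
  if lw ∈ smallWords then lw
  else if PySem.Chars.isIn ['\''] w = false then pyTitle w
  else
    let bp := splitFirstApos w
    if PySem.Chars.startswith (PySem.Chars.lower bp.2) ['s'] then pyTitle bp.1 ++ ['\'', 's']
    else pyTitle bp.1 ++ ['\''] ++ bp.2

-- hand port of name.split(' ') (single-character separator, empty pieces kept), exact
def splitSpace : List Char → List (List Char)
  | [] => [[]]
  | c :: cs =>
    if c = ' ' then [] :: splitSpace cs
    else
      match splitSpace cs with
      | h :: t => (c :: h) :: t
      | [] => [[c]]

def normalize_speaker_name_alt (speaker : String) : String :=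
  if PySem.Str.lower (PySem.Str.strip speaker) = "narrator" then "Narrator"
  else
    let name := (PySem.Str.strip speaker).toList
    String.ofList (List.intercalate [' '] ((splitSpace name).map normWordB))

-- ===== PRECONDITION & SPEC =====
def Spec_normalize_speaker_name (speaker : String) (out : String) : Prop := out = normalize_speaker_name_alt speaker
instance (speaker : String) (out : String) : Decidable (Spec_normalize_speaker_name speaker out) := by unfold Spec_normalize_speaker_name; infer_instance

-- ===== CLAIM (what is proved, stated in full; the proofs are below) =====
def Claim_equal_normalize_speaker_name : Prop := ∀ (speaker : String), Dom_normalize_speaker_name speaker → Spec_normalize_speaker_name speaker (normalize_speaker_name speaker)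

-- ===== LEMMAS AND PROOFS =====

-- the first piece of a split gets whatever word was already in progress prepended
def consHead (cur : List Char) : List (List Char) → List (List Char)
  | h :: t => (cur ++ h) :: t
  | [] => [cur]

theorem splitSpace_ne_nil (cs : List Char) : splitSpace cs ≠ [] := by
  cases cs with
  | nil => simp [splitSpace]
  | cons c cs =>
    simp only [splitSpace]
    split_ifs
    · simp
    · cases h : splitSpace cs <;> simp

theorem normWordB_nil : normWordB [] = [] := by decide

theorem normWordA_eq (w : List Char) : normWordA w = normWordB w := by
  by_cases h : w = [' ']
  · subst h; decide
  · simp only [normWordA, normWordB, if_neg h]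
    cases h2 : PySem.Chars.isIn ['\''] w <;> simp

theorem normWordB_cur (cur : List Char) :
    normWordB cur = if cur = [] then [] else normWordA cur := by
  by_cases h : cur = []
  · simp [h, normWordB_nil]
  · simp [h, normWordA_eq]

theorem intercalate_cons_ne (sep x : List Char) (xs : List (List Char)) (h : xs ≠ []) :
    List.intercalate sep (x :: xs) = x ++ sep ++ List.intercalate sep xs := by
  cases xs with
  | nil => exact absurd rfl h
  | cons y ys => simp [List.intercalate, List.intersperse]

theorem intercalate_nil_flatten (xs : List (List Char)) :
    List.intercalate [] xs = xs.flatten := by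
  induction xs with
  | nil => simp [List.intercalate]
  | cons x xs ih =>
    cases xs with
    | nil => simp [List.intercalate]
    | cons y ys =>
      rw [intercalate_cons_ne _ _ _ (by simp), ih]
      simp

theorem tok_acc (cs : List Char) (ws : List (List Char)) (cur : List Char) :
    cs.foldl tokStepA (ws, cur) =
      (ws ++ (cs.foldl tokStepA ([], cur)).1, (cs.foldl tokStepA ([], cur)).2) := by
  induction cs generalizing ws cur with
  | nil => simp
  | cons c cs ih =>
    simp only [List.foldl_cons]
    by_cases hc : c = ' '
    · subst hc
      rw [show tokStepA (ws, cur) ' ' =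
            ((if cur = [] then ws else ws ++ [cur]) ++ [[' ']], []) from rfl,
          show tokStepA (([] : List (List Char)), cur) ' ' =
            ((if cur = [] then ([] : List (List Char)) else [] ++ [cur]) ++ [[' ']], []) from rfl,
          ih, ih (ws := (if cur = [] then ([] : List (List Char)) else [] ++ [cur]) ++ [[' ']])]
      by_cases h : cur = [] <;> simp [h]
    · have hA : tokStepA (ws, cur) c = (ws, cur ++ [c]) := by
        simp only [tokStepA, if_neg hc]; split_ifs <;> rfl
      have hB : tokStepA (([] : List (List Char)), cur) c = ([], cur ++ [c]) := by
        simp only [tokStepA, if_neg hc]; split_ifs <;> rfl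
      rw [hA, hB, ih]

-- A's token list, processed and concatenated, equals B's split/normalize/join,
-- for an arbitrary in-progress word cur
theorem key (cs cur : List Char) :
    (((if (cs.foldl tokStepA ([], cur)).2 = [] then (cs.foldl tokStepA ([], cur)).1
       else (cs.foldl tokStepA ([], cur)).1 ++ [(cs.foldl tokStepA ([], cur)).2]).map normWordA).flatten)
    = List.intercalate [' '] ((consHead cur (splitSpace cs)).map normWordB) := by
  induction cs generalizing cur with
  | nil =>
    simp only [List.foldl_nil, splitSpace, consHead, List.append_nil, List.map]
    rw [List.intercalate]
    by_cases h : cur = [] <;> simp [h, normWordB_cur]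
  | cons c cs ih =>
    by_cases hc : c = ' '
    · subst hc
      simp only [List.foldl_cons]
      rw [show tokStepA (([] : List (List Char)), cur) ' ' =
            ((if cur = [] then ([] : List (List Char)) else [] ++ [cur]) ++ [[' ']], []) from rfl]
      rw [tok_acc]
      have hsplit : splitSpace (' ' :: cs) = [] :: splitSpace cs := by simp [splitSpace]
      rw [hsplit]
      have hcons : consHead cur ([] :: splitSpace cs) = cur :: splitSpace cs := by
        simp [consHead]
      rw [hcons]
      have hne : (splitSpace cs).map normWordB ≠ [] := by
        simp [splitSpace_ne_nil cs]
      rw [show (cur :: splitSpace cs).map normWordB = normWordB cur :: (splitSpace cs).map normWordB from rfl,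
          intercalate_cons_ne _ _ _ hne]
      have hBside := ih ([])
      have hconsnil : consHead [] (splitSpace cs) = splitSpace cs := by
        cases h : splitSpace cs with
        | nil => exact absurd h (splitSpace_ne_nil cs)
        | cons a b => simp [consHead]
      rw [hconsnil] at hBside
      rw [← hBside]
      -- now distribute the accumulated prefix on the A side
      by_cases h : cur = [] <;>
        · simp only [h]
          split_ifs <;>
            simp_all [normWordB_cur, List.map_append, List.flatten_append,
              normWordA, List.append_assoc]
    · simp only [List.foldl_cons]
      have hA : tokStepA (([] : List (List Char)), cur) c = ([], cur ++ [c]) := by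
        simp only [tokStepA, if_neg hc]; split_ifs <;> rfl
      rw [hA]
      have hsplit : ∃ h t, splitSpace cs = h :: t := by
        cases hs : splitSpace cs with
        | nil => exact absurd hs (splitSpace_ne_nil cs)
        | cons a b => exact ⟨a, b, rfl⟩
      obtain ⟨h, t, hs⟩ := hsplit
      have : splitSpace (c :: cs) = (c :: h) :: t := by
        simp [splitSpace, hc, hs]
      rw [this]
      have : consHead cur ((c :: h) :: t) = consHead (cur ++ [c]) (h :: t) := by
        simp [consHead]
      rw [this, ← hs, ih]

-- ===== VERDICT (by name: the statement is the Claim_ definition above) =====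
theorem normalize_speaker_name_spec : Claim_equal_normalize_speaker_name := by
  intro speaker _
  unfold Spec_normalize_speaker_name normalize_speaker_name normalize_speaker_name_alt
  by_cases hn : PySem.Str.lower (PySem.Str.strip speaker) = "narrator"
  · simp [hn]
  · simp only [if_neg hn]
    apply congrArg String.ofList
    rw [PySem.Chars.join, intercalate_nil_flatten,
        PySem.List.foldl_append_singleton_eq_map, List.nil_append]
    have := key (PySem.Str.strip speaker).toList []
    have hcons : consHead [] (splitSpace (PySem.Str.strip speaker).toList)
        = splitSpace (PySem.Str.strip speaker).toList := by
      cases h : splitSpace (PySem.Str.strip speaker).toList with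
      | nil => exact absurd h (splitSpace_ne_nil _)
      | cons a b => simp [consHead]
    rw [hcons] at this
    exact this
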